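-- pv_equiv track=rewrite | github.com/Jungwoo-20/Algorithm | Programmers/직업군 추천하기.py | solution
-- ===== SOURCE A (Python) =====
-- def solution(table, languages, preference):
--     score = {}
--     answer = ''
--     res = 0
--     for i, j in zip(languages, preference):
--         score[i] = j
--     for i in table:
--         tmp = i.split(' ')
--         tmp_score = 0
--         cnt = 0
--         for j in range(len(tmp)-1, -1, -1):
--             tmp_score += 1
--             try:
--                 if score[tmp[j]]:
--                     cnt += tmp_score * score[tmp[j]]
--             except:
--                 pass
--         if cnt > res:
--             answer = tmp[0]
--             res = cnt
--         elif cnt == res: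
--             if answer < tmp[0]:
--                 continue
--             else:
--                 answer = tmp[0]
--
--     return answer
-- ===== SOURCE B (Python) =====
-- def solution(table, languages, preference):
--     score = dict(zip(languages, preference))
--     rows = []
--     for row in table:
--         tmp = row.split(' ')
--         n = len(tmp)
--         s = sum((n - j) * score.get(f, 0) for j, f in enumerate(tmp))
--         rows.append((s, tmp[0]))
--     rows.sort(key=lambda p: (-p[0], p[1]))
--     if rows and rows[0][0] > 0:
--         return rows[0][1]
--     return ''
-- ===== Notes on version B (the rewrite author's own statement) =====
-- stated objective: idiomatic
-- what changed: A's single-pass running max with manual lexicographic tie-breaking and a per-row countdown index loop with try/except is replaced by: build a dict with .get(,0), score each row with a sum over enumerate, collect (score, name) pairs, sort them by (-score, name) and take the head (empty string when the best score is not positive).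
import Mathlib
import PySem

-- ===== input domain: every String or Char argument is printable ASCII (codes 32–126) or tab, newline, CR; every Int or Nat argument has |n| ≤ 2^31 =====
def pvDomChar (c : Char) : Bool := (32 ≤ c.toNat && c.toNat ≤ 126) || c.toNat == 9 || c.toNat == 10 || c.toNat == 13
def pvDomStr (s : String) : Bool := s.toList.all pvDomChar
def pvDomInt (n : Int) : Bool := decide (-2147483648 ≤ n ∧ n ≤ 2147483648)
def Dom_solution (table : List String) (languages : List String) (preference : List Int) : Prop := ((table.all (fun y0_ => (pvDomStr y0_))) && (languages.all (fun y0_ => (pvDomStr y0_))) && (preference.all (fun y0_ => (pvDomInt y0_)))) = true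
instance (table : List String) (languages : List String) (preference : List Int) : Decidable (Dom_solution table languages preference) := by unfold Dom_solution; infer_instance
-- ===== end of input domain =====

-- B replaces A's running max with manual tie-breaking by build-rows / sort by (-score, name) / take the head (objective: idiomatic alternative, not faster).

-- ===== PORT A =====
def solution (table : List String) (languages : List String) (preference : List Int) : String :=
  let score : PySem.Dict String Int :=
    (languages.zip preference).foldl (fun d p => d.insert p.1 p.2) PySem.Dict.empty
  let st :=
    table.foldl (fun (st : String × Int) i =>
      let tmp := (PySem.Str.split? i " ").getD [""]  -- i.split(' '): sep ≠ "" so split? is always `some`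
      let inner :=
        (PySem.List.pyRange ((tmp.length : Int) - 1) (-1) (-1)).foldl
          (fun (p : Int × Int) j =>
            let tmp_score := p.1 + 1
            let cnt :=
              match score.get? (PySem.List.pyGetD tmp j "") with  -- try: score[tmp[j]] / except KeyError: pass
              | none => p.2
              | some v => if v ≠ 0 then p.2 + tmp_score * v else p.2
            (tmp_score, cnt))
          (0, 0)
      let cnt := inner.2
      if cnt > st.2 then (PySem.List.pyGetD tmp 0 "", cnt)
      else if cnt = st.2 then
        (if st.1 < PySem.List.pyGetD tmp 0 "" then st
         else (PySem.List.pyGetD tmp 0 "", st.2))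
      else st)
      ("", 0)
  st.1

-- ===== PORT B =====
def solution_alt (table : List String) (languages : List String) (preference : List Int) : String :=
  let score : PySem.Dict String Int := PySem.Dict.ofList (languages.zip preference)
  let rows :=
    table.map (fun row =>
      let tmp := (PySem.Str.split? row " ").getD [""]  -- row.split(' '): sep ≠ "" so split? is always `some`
      let n : Int := tmp.length
      (((PySem.List.enumerate tmp 0).map (fun p => (n - p.1) * score.getD p.2 0)).sum,
       PySem.List.pyGetD tmp 0 ""))
  match PySem.List.sorted2 rows (fun p => -p.1) (fun p => p.2) with
  | [] => ""
  | (s, name) :: _ => if s > 0 then name else ""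

-- ===== PRECONDITION & SPEC =====
def Spec_solution (table : List String) (languages : List String) (preference : List Int) (out : String) : Prop := out = solution_alt table languages preference
instance (table : List String) (languages : List String) (preference : List Int) (out : String) : Decidable (Spec_solution table languages preference out) := by unfold Spec_solution; infer_instance

-- ===== CLAIM (what is proved, stated in full; the proofs are below) =====
def Claim_equal_solution : Prop := ∀ (table : List String) (languages : List String) (preference : List Int), Dom_solution table languages preference → Spec_solution table languages preference (solution table languages preference)

-- ===== LEMMAS AND PROOFS =====

-- g x = score.get(x, 0)
def pvG (sc : PySem.Dict String Int) (x : String) : Int := sc.getD x 0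

-- the element-wise step A's countdown loop performs, after collapsing try/except+truthiness to getD
def pvStep (sc : PySem.Dict String Int) (p : Int × Int) (x : String) : Int × Int :=
  (p.1 + 1, p.2 + (p.1 + 1) * pvG sc x)

-- weighted sum with weights t+1, t+2, … along the list
def pvS (sc : PySem.Dict String Int) : List String → Int → Int
  | [], _ => 0
  | x :: xs, t => (t + 1) * pvG sc x + pvS sc xs (t + 1)

-- A's per-table-row update of (answer, res)
def pvUpd (st : String × Int) (q : Int × String) : String × Int :=
  if q.1 > st.2 then (q.2, q.1)
  else if q.1 = st.2 then (if st.1 < q.2 then st else (q.2, st.2))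
  else st

-- "p is at least as good as q": higher score, or same score and ≤ name
def pvMin (p q : Int × String) : Prop := q.1 < p.1 ∨ (p.1 = q.1 ∧ p.2 ≤ q.2)

-- strict version (= the comparator sorted2 uses with keys (-s, name))
def pvLt (p q : Int × String) : Prop := q.1 < p.1 ∨ (p.1 = q.1 ∧ p.2 < q.2)

-- B's per-row value
def pvRow (sc : PySem.Dict String Int) (row : String) : Int × String :=
  let tmp := (PySem.Str.split? row " ").getD [""]
  let n : Int := tmp.length
  (((PySem.List.enumerate tmp 0).map (fun p => (n - p.1) * sc.getD p.2 0)).sum,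
   PySem.List.pyGetD tmp 0 "")

lemma pvMin_antisymm (p q : Int × String) (h1 : pvMin p q) (h2 : pvMin q p) : p = q := by
  unfold pvMin at h1 h2
  rcases h1 with h1 | ⟨h1a, h1b⟩
  · rcases h2 with h2 | ⟨h2a, h2b⟩
    · exact ((lt_asymm h1) h2).elim
    · exact ((lt_irrefl p.1) (h2a ▸ h1)).elim
  · rcases h2 with h2 | ⟨h2a, h2b⟩
    · exact ((lt_irrefl p.1) (h1a.symm ▸ h2)).elim
    · exact Prod.ext h1a (le_antisymm h1b h2b)

lemma pvMin_trans (p q r : Int × String) (h1 : pvMin p q) (h2 : pvMin q r) : pvMin p r := by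
  unfold pvMin at *
  rcases h1 with h1 | ⟨h1a, h1b⟩ <;> rcases h2 with h2 | ⟨h2a, h2b⟩
  · left; omega
  · left; omega
  · left; omega
  · right; exact ⟨h1a.trans h2a, h1b.trans h2b⟩

lemma pvLt_asymm (p q : Int × String) (h : pvLt p q) : ¬ pvLt q p := by
  unfold pvLt at *
  rcases h with h | ⟨ha, hb⟩
  · rintro (h2 | ⟨h2a, h2b⟩)
    · exact (lt_asymm h) h2
    · exact (lt_irrefl q.1) (h2a ▸ h)
  · rintro (h2 | ⟨h2a, h2b⟩)
    · exact (lt_irrefl q.1) (ha ▸ h2)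
    · exact (lt_asymm hb) h2b

lemma pvLt_irrefl (p : Int × String) : ¬ pvLt p p := fun h => pvLt_asymm p p h h

lemma pvLt_trans (p q r : Int × String) (h1 : pvLt p q) (h2 : pvLt q r) : pvLt p r := by
  unfold pvLt at *
  rcases h1 with h1 | ⟨h1a, h1b⟩ <;> rcases h2 with h2 | ⟨h2a, h2b⟩
  · left; omega
  · left; omega
  · left; omega
  · right; exact ⟨h1a.trans h2a, h1b.trans h2b⟩

lemma not_pvLt_iff (p q : Int × String) : ¬ pvLt q p ↔ pvMin p q := by
  unfold pvLt pvMin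
  constructor
  · intro h
    rcases lt_trichotomy p.1 q.1 with h1 | h1 | h1
    · exact absurd (Or.inl h1) h
    · rcases le_or_gt p.2 q.2 with h2 | h2
      · right; exact ⟨h1, h2⟩
      · exact absurd (Or.inr ⟨h1.symm, h2⟩) h
    · left; exact h1
  · rintro (h | ⟨ha, hb⟩) <;> rintro (h2 | ⟨h2a, h2b⟩)
    · exact (lt_asymm h) h2
    · exact (lt_irrefl q.1) (h2a ▸ h)
    · exact (lt_irrefl q.1) (ha ▸ h2)
    · exact (lt_irrefl q.2) (lt_of_lt_of_le h2b hb)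

-- Boolean form of pvLt (no Decidable instance needed)
def pvLtb (p q : Int × String) : Bool :=
  decide (q.1 < p.1) || (decide (p.1 = q.1) && decide (p.2 < q.2))

lemma pvLtb_eq_true_iff (p q : Int × String) : pvLtb p q = true ↔ pvLt p q := by
  unfold pvLtb pvLt
  simp

-- the comparator sorted2 builds from keys (-s, name) is pvLtb
lemma pvLt_decide (p q : Int × String) :
    (decide ((fun r : Int × String => -r.1) p < (fun r : Int × String => -r.1) q) ||
      (!decide ((fun r : Int × String => -r.1) q < (fun r : Int × String => -r.1) p) &&
        decide ((fun r : Int × String => r.2) p < (fun r : Int × String => r.2) q)))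
    = pvLtb p q := by
  unfold pvLtb
  by_cases h1 : q.1 < p.1 <;> by_cases h2 : p.1 = q.1 <;> by_cases h3 : p.2 < q.2 <;>
    simp [h1, h2, h3]
  omega

-- pvS over an append
lemma pvS_append (sc : PySem.Dict String Int) (l1 l2 : List String) :
    ∀ t, pvS sc (l1 ++ l2) t = pvS sc l1 t + pvS sc l2 (t + l1.length) := by
  induction l1 with
  | nil => intro t; simp [pvS]
  | cons x xs ih =>
      intro t
      simp only [List.cons_append, pvS, ih (t + 1), List.length_cons]
      push_cast
      ring

-- the countdown fold, expressed on the reversed list, computes pvS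
lemma foldl_pvStep (sc : PySem.Dict String Int) (l : List String) :
    ∀ t c, l.foldl (pvStep sc) (t, c) = (t + l.length, c + pvS sc l t) := by
  induction l with
  | nil => intro t c; simp [pvS]
  | cons x xs ih =>
      intro t c
      simp only [List.foldl_cons, pvStep, pvS, ih, List.length_cons, Prod.mk.injEq]
      constructor <;> push_cast <;> ring

-- enumerate with shifted start
lemma enumerate_shift (l : List String) : ∀ s : Int,
    PySem.List.enumerate l (s + 1) = (PySem.List.enumerate l s).map (fun p => (p.1 + 1, p.2)) := by
  induction l with
  | nil => intro s; simp [PySem.List.enumerate_nil]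
  | cons x xs ih => intro s; simp [PySem.List.enumerate_cons, ih]

-- pvS of the reverse is B's enumerate sum
lemma pvS_reverse (sc : PySem.Dict String Int) (l : List String) :
    ∀ t : Int, pvS sc l.reverse t =
      ((PySem.List.enumerate l 0).map (fun p => ((l.length : Int) + t - p.1) * pvG sc p.2)).sum := by
  induction l with
  | nil => intro t; simp [pvS, PySem.List.enumerate_nil]
  | cons x xs ih =>
      intro t
      rw [List.reverse_cons, pvS_append]
      simp only [PySem.List.enumerate_cons, List.map_cons, List.sum_cons, pvS,
        List.length_reverse, List.length_cons]
      rw [enumerate_shift xs 0, List.map_map, ih t]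
      have hfun : ((fun p : Int × String => ((↑(xs.length + 1) : Int) + t - p.1) * pvG sc p.2) ∘
          fun p : Int × String => (p.1 + 1, p.2))
          = fun p : Int × String => ((xs.length : Int) + t - p.1) * pvG sc p.2 := by
        funext p; simp only [Function.comp_apply]; push_cast; ring
      rw [hfun]
      push_cast
      ring

-- A's inner loop over range(len(tmp)-1, -1, -1) computes B's row score
lemma inner_eq (sc : PySem.Dict String Int) (tmp : List String) :
    ((PySem.List.pyRange ((tmp.length : Int) - 1) (-1) (-1)).foldl
      (fun (p : Int × Int) j =>
        let tmp_score := p.1 + 1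
        let cnt :=
          match sc.get? (PySem.List.pyGetD tmp j "") with
          | none => p.2
          | some v => if v ≠ 0 then p.2 + tmp_score * v else p.2
        (tmp_score, cnt))
      (0, 0)).2
    = ((PySem.List.enumerate tmp 0).map
        (fun p => ((tmp.length : Int) - p.1) * sc.getD p.2 0)).sum := by
  have hbody : (fun (p : Int × Int) j =>
      let tmp_score := p.1 + 1
      let cnt :=
        match sc.get? (PySem.List.pyGetD tmp j "") with
        | none => p.2
        | some v => if v ≠ 0 then p.2 + tmp_score * v else p.2
      (tmp_score, cnt))
      = fun (p : Int × Int) j => pvStep sc p (PySem.List.pyGetD tmp j "") := by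
    funext p j
    simp only [pvStep, pvG, PySem.Dict.getD_eq_get?_getD]
    cases h : sc.get? (PySem.List.pyGetD tmp j "") with
    | none => simp
    | some v =>
        by_cases hv : v = 0 <;> simp [hv]
  rw [hbody, PySem.List.pyRange_neg_one_eq_reverse]
  have : ((tmp.length : Int) - 1) + 1 = (tmp.length : Int) := by ring
  rw [this]
  rw [show ((-1 : Int) + 1) = 0 by ring]
  rw [← List.foldl_map (f := fun j => PySem.List.pyGetD tmp j "") (g := pvStep sc),
    List.map_reverse, PySem.List.map_pyGetD_pyRange_zero']
  rw [foldl_pvStep, pvS_reverse]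
  simp [pvG]

-- A's fold over the rows picks the pvMin-minimum of (r, a) :: rows
lemma foldl_pvUpd (rows : List (Int × String)) : ∀ (a : String) (r : Int),
    (((rows.foldl pvUpd (a, r)).2, (rows.foldl pvUpd (a, r)).1) = (r, a) ∨
      ((rows.foldl pvUpd (a, r)).2, (rows.foldl pvUpd (a, r)).1) ∈ rows) ∧
    pvMin ((rows.foldl pvUpd (a, r)).2, (rows.foldl pvUpd (a, r)).1) (r, a) ∧
    ∀ p ∈ rows, pvMin ((rows.foldl pvUpd (a, r)).2, (rows.foldl pvUpd (a, r)).1) p := by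
  induction rows with
  | nil => intro a r; exact ⟨Or.inl rfl, Or.inr ⟨rfl, le_refl _⟩, by simp⟩
  | cons q rest ih =>
      intro a r
      simp only [List.foldl_cons]
      obtain ⟨hmem, hmin, hall⟩ := ih (pvUpd (a, r) q).1 (pvUpd (a, r) q).2
      simp only [Prod.mk.eta] at hmem hmin hall
      have hq : ((pvUpd (a, r) q).2, (pvUpd (a, r) q).1) = (r, a) ∨
          ((pvUpd (a, r) q).2, (pvUpd (a, r) q).1) = q := by
        unfold pvUpd
        split_ifs with h1 h2 h3
        · right; exact Prod.mk.eta
        · left; rfl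
        · right; rw [← h2]
        · left; rfl
      have hminr : pvMin ((pvUpd (a, r) q).2, (pvUpd (a, r) q).1) (r, a) := by
        unfold pvUpd pvMin
        split_ifs with h1 h2 h3
        · exact Or.inl h1
        · exact Or.inr ⟨rfl, le_refl _⟩
        · exact Or.inr ⟨rfl, le_of_not_gt h3⟩
        · exact Or.inr ⟨rfl, le_refl _⟩
      have hminq : pvMin ((pvUpd (a, r) q).2, (pvUpd (a, r) q).1) q := by
        unfold pvUpd pvMin
        split_ifs with h1 h2 h3
        · exact Or.inr ⟨rfl, le_refl _⟩
        · exact Or.inr ⟨h2.symm, le_of_lt h3⟩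
        · exact Or.inr ⟨h2.symm, le_refl _⟩
        · exact Or.inl (lt_of_le_of_ne (le_of_not_gt h1) h2)
      refine ⟨?_, ?_, ?_⟩
      · rcases hmem with h | h
        · rw [h]
          rcases hq with h2 | h2
          · exact Or.inl h2
          · rw [h2]; exact Or.inr (List.mem_cons_self ..)
        · exact Or.inr (List.mem_cons_of_mem _ h)
      · exact pvMin_trans _ _ _ hmin hminr
      · intro p hp
        rcases List.mem_cons.1 hp with rfl | hp'
        · exact pvMin_trans _ _ _ hmin hminq
        · exact hall p hp'

-- head of sorted2 (keys (-s, name)) is pvMin-below every element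
lemma sorted2_head_min (rows : List (Int × String)) (m : Int × String) (t : List (Int × String))
    (h : PySem.List.sorted2 rows (fun p => -p.1) (fun p => p.2) = m :: t) :
    ∀ y ∈ rows, pvMin m y := by
  have key : ∀ (l : List (Int × String)) (acc : List (Int × String)),
      (∀ m' t', acc = m' :: t' → ∀ y ∈ acc, ¬ pvLt y m') →
      ∀ m' t', l.foldl (fun acc x => PySem.List.insertBy
          (fun a b => decide ((fun p : Int × String => -p.1) a < (fun p : Int × String => -p.1) b) ||
            (!decide ((fun p : Int × String => -p.1) b < (fun p : Int × String => -p.1) a) &&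
              decide ((fun p : Int × String => p.2) a < (fun p : Int × String => p.2) b))) x acc) acc
          = m' :: t' →
      ∀ y, (y ∈ l ∨ y ∈ acc) → ¬ pvLt y m' := by
    intro l
    induction l with
    | nil =>
        intro acc hinv m' t' heq y hy
        rcases hy with hy | hy
        · simp at hy
        · exact hinv m' t' heq y hy
    | cons x xs ih =>
        intro acc hinv m' t' heq y hy
        simp only [List.foldl_cons] at heq
        set acc' := PySem.List.insertBy _ x acc with hacc'
        have hinv' : ∀ m'' t'', acc' = m'' :: t'' → ∀ y ∈ acc', ¬ pvLt y m'' := by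
          intro m'' t'' heq'' z hz
          rw [hacc'] at heq'' hz
          cases acc with
          | nil =>
              simp only [PySem.List.insertBy] at heq'' hz
              cases heq''
              simp at hz
              subst hz
              exact pvLt_irrefl z
          | cons b bs =>
              rw [show (PySem.List.insertBy (fun a b => decide ((fun p : Int × String => -p.1) a < (fun p : Int × String => -p.1) b) ||
                  (!decide ((fun p : Int × String => -p.1) b < (fun p : Int × String => -p.1) a) &&
                    decide ((fun p : Int × String => p.2) a < (fun p : Int × String => p.2) b))) x (b :: bs))
                  = if pvLtb x b = true then x :: b :: bs else b :: PySem.List.insertBy _ x bs from by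
                    simp only [PySem.List.insertBy]; rw [pvLt_decide]] at heq'' hz
              by_cases hxb : pvLt x b
              · rw [if_pos ((pvLtb_eq_true_iff x b).2 hxb)] at heq'' hz
                injection heq'' with hm ht
                subst hm
                rcases List.mem_cons.1 hz with rfl | hz2
                · exact pvLt_irrefl _
                · rcases List.mem_cons.1 hz2 with rfl | hz3
                  · exact pvLt_asymm _ _ hxb
                  · intro hc
                    have hzb : ¬ pvLt z b := hinv b bs rfl z (List.mem_cons_of_mem _ hz3)
                    exact hzb (pvLt_trans _ _ _ hc hxb)
              · rw [if_neg (fun hc => hxb ((pvLtb_eq_true_iff x b).1 hc))] at heq'' hz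
                injection heq'' with hm ht
                subst hm
                rcases List.mem_cons.1 hz with rfl | hz2
                · exact pvLt_irrefl _
                · rcases (PySem.List.mem_insertBy _ x z bs).1 hz2 with rfl | hz3
                  · exact hxb
                  · exact hinv b bs rfl z (List.mem_cons_of_mem _ hz3)
        have := ih acc' hinv' m' t' heq y
        rcases hy with hy | hy
        · rcases List.mem_cons.1 hy with rfl | hy'
          · exact this (Or.inr (by rw [hacc']; exact (PySem.List.mem_insertBy _ _ _ _).2 (Or.inl rfl)))
          · exact this (Or.inl hy')
        · exact this (Or.inr (by rw [hacc']; exact (PySem.List.mem_insertBy _ _ _ _).2 (Or.inr hy)))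
  intro y hy
  rw [← not_pvLt_iff]
  exact key rows [] (by intro m' t' h'; cases h') m t h y (Or.inl hy)

lemma string_le_nil (s : String) (h : s ≤ "") : s = "" :=
  le_antisymm h (not_lt.mp (by rw [String.lt_iff_toList_lt]; simp [String.toList]))

-- selection: the running-max/tie-break fold returns exactly what sort-then-head picks
lemma select_eq (rows : List (Int × String)) :
    (rows.foldl pvUpd ("", 0)).1 =
      (match PySem.List.sorted2 rows (fun p => -p.1) (fun p => p.2) with
        | [] => ""
        | (s, name) :: _ => if s > 0 then name else "") := by
  obtain ⟨hmem, hmin, hall⟩ := foldl_pvUpd rows "" 0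
  cases hs : PySem.List.sorted2 rows (fun p => -p.1) (fun p => p.2) with
  | nil =>
      have : rows = [] := by
        have hp := PySem.List.sorted2_perm rows (fun p => -p.1) (fun p => p.2) false
        rw [hs] at hp
        exact (List.Perm.nil_eq hp).symm
      subst this
      rfl
  | cons m t =>
      have hmrows : m ∈ rows := by
        have hp := PySem.List.sorted2_perm rows (fun p => -p.1) (fun p => p.2) false
        rw [hs] at hp
        exact hp.mem_iff.1 (List.mem_cons_self ..)
      have hminall : ∀ y ∈ rows, pvMin m y := sorted2_head_min rows m t hs
      obtain ⟨ms, mn⟩ := m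
      by_cases hm1 : ms > 0
      · -- the best score is positive: A's fold lands exactly on m
        have h1 : pvMin ((rows.foldl pvUpd ("", 0)).2, (rows.foldl pvUpd ("", 0)).1) (ms, mn) :=
          hall _ hmrows
        have h2 : pvMin (ms, mn) ((rows.foldl pvUpd ("", 0)).2, (rows.foldl pvUpd ("", 0)).1) := by
          rcases hmem with h | h
          · rw [h]; exact Or.inl hm1
          · exact hminall _ h
        have := pvMin_antisymm _ _ h1 h2
        simp only [if_pos hm1]
        exact congrArg Prod.snd this
      · -- all scores ≤ 0: A's fold keeps the initial ('', 0)
        simp only [if_neg hm1]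
        rcases hmem with h | h
        · exact congrArg Prod.snd h
        · have hle : (rows.foldl pvUpd ("", 0)).2 ≤ ms := by
            rcases hminall _ h with h2 | ⟨h2, _⟩
            · exact le_of_lt h2
            · exact le_of_eq h2.symm
          rcases hmin with h2 | ⟨h2, h3⟩
          · omega
          · exact string_le_nil _ h3

-- A's loop body is pvUpd applied to B's row value
lemma body_eq (sc : PySem.Dict String Int) (st : String × Int) (i : String) :
    (let tmp := (PySem.Str.split? i " ").getD [""]
     let inner :=
       (PySem.List.pyRange ((tmp.length : Int) - 1) (-1) (-1)).foldl
         (fun (p : Int × Int) j =>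
           let tmp_score := p.1 + 1
           let cnt :=
             match sc.get? (PySem.List.pyGetD tmp j "") with
             | none => p.2
             | some v => if v ≠ 0 then p.2 + tmp_score * v else p.2
           (tmp_score, cnt))
         (0, 0)
     let cnt := inner.2
     if cnt > st.2 then (PySem.List.pyGetD tmp 0 "", cnt)
     else if cnt = st.2 then
       (if st.1 < PySem.List.pyGetD tmp 0 "" then st
        else (PySem.List.pyGetD tmp 0 "", st.2))
     else st)
    = pvUpd st (pvRow sc i) := by
  have hc := inner_eq sc ((PySem.Str.split? i " ").getD [""])
  simp only [pvUpd, pvRow]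
  rw [hc]

theorem pv_main (sc : PySem.Dict String Int) (table : List String) :
    (table.foldl (fun (st : String × Int) i =>
      let tmp := (PySem.Str.split? i " ").getD [""]
      let inner :=
        (PySem.List.pyRange ((tmp.length : Int) - 1) (-1) (-1)).foldl
          (fun (p : Int × Int) j =>
            let tmp_score := p.1 + 1
            let cnt :=
              match sc.get? (PySem.List.pyGetD tmp j "") with
              | none => p.2
              | some v => if v ≠ 0 then p.2 + tmp_score * v else p.2
            (tmp_score, cnt))
          (0, 0)
      let cnt := inner.2
      if cnt > st.2 then (PySem.List.pyGetD tmp 0 "", cnt)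
      else if cnt = st.2 then
        (if st.1 < PySem.List.pyGetD tmp 0 "" then st
         else (PySem.List.pyGetD tmp 0 "", st.2))
      else st) ("", 0)).1
    = (match PySem.List.sorted2 (table.map (pvRow sc)) (fun p => -p.1) (fun p => p.2) with
        | [] => ""
        | (s, name) :: _ => if s > 0 then name else "") := by
  have hb : (fun (st : String × Int) i =>
      let tmp := (PySem.Str.split? i " ").getD [""]
      let inner :=
        (PySem.List.pyRange ((tmp.length : Int) - 1) (-1) (-1)).foldl
          (fun (p : Int × Int) j =>
            let tmp_score := p.1 + 1
            let cnt :=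
              match sc.get? (PySem.List.pyGetD tmp j "") with
              | none => p.2
              | some v => if v ≠ 0 then p.2 + tmp_score * v else p.2
            (tmp_score, cnt))
          (0, 0)
      let cnt := inner.2
      if cnt > st.2 then (PySem.List.pyGetD tmp 0 "", cnt)
      else if cnt = st.2 then
        (if st.1 < PySem.List.pyGetD tmp 0 "" then st
         else (PySem.List.pyGetD tmp 0 "", st.2))
      else st)
      = fun st i => pvUpd st (pvRow sc i) := by
    funext st i
    exact body_eq sc st i
  rw [hb, ← List.foldl_map (f := pvRow sc) (g := pvUpd), select_eq]

-- ===== VERDICT (by name: the statement is the Claim_ definition above) =====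
theorem solution_spec : Claim_equal_solution := by
  intro table languages preference _
  unfold Spec_solution solution solution_alt
  exact pv_main (PySem.Dict.ofList (languages.zip preference)) table
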